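-- pv_equiv track=rewrite | github.com/Tulpana/ARC-AGI-2 | arc_agi_2_submission/solver/generalization.py | _mode_colour
-- ===== SOURCE A (Python) =====
-- from collections import Counter
-- from typing import Any, Dict, Iterable, List, Mapping, Sequence, Set, Tuple
--
-- def _mode_colour(grid: Sequence[Sequence[int]]) -> int:
--     """Return the most common colour in ``grid`` (ties resolved by lower colour)."""
--
--     counts: Counter[int] = Counter()
--     for row in grid:
--         if isinstance(row, Sequence):
--             for value in row:
--                 try:
--                     counts[int(value)] += 1
--                 except Exception:
--                     continue
--     if not counts:
--         return 0
--     max_count = max(counts.values())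
--     return min((colour for colour, count in counts.items() if count == max_count), default=0)
-- ===== SOURCE B (Python) =====
-- from typing import Sequence
--
--
-- def _mode_colour(grid: Sequence[Sequence[int]]) -> int:
--     """Most common colour in ``grid`` (ties resolved by lower colour),
--     by sorting the collected values and scanning consecutive runs."""
--     vals = []
--     for row in grid:
--         if isinstance(row, Sequence):
--             for value in row:
--                 try:
--                     vals.append(int(value))
--                 except Exception:
--                     continue
--     if not vals:
--         return 0
--     vals.sort()
--     best_c, best_n = vals[0], 1
--     run_c, run_n = vals[0], 1
--     for v in vals[1:]:
--         if v == run_c: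
--             run_n += 1
--         else:
--             run_c, run_n = v, 1
--         if run_n > best_n:
--             best_c, best_n = run_c, run_n
--     return best_c
-- ===== Notes on version B (the rewrite author's own statement) =====
-- stated objective: alternative
-- what changed: Replaces the Counter + max-of-values + min-filter pipeline by collecting the values into a list, sorting it ascending and scanning consecutive equal runs once, keeping the first (lowest) colour whose run is strictly longest.
import Mathlib
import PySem

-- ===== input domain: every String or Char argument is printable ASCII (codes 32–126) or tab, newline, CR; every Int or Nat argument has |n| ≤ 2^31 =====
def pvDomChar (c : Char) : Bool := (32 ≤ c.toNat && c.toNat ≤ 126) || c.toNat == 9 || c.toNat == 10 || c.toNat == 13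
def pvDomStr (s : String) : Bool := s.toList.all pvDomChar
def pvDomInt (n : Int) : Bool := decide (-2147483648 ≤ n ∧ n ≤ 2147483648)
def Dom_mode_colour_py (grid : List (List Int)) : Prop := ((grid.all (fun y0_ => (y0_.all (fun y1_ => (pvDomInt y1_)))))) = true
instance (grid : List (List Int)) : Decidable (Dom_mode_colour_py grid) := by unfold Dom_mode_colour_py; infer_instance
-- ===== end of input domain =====

-- B replaces A's Counter + max(values) + min-over-filtered-items pipeline by a sort of the
-- collected values followed by a single consecutive-run scan (alternative decomposition; not claimed faster).

-- ===== PORT A =====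
-- Counter loop: rows are lists (always a Sequence) of Int (int(value) never raises), so every cell is counted.
def mode_colour_py (grid : List (List Int)) : Int :=
  let counts : PySem.Dict Int Int :=
    grid.foldl (fun d row => row.foldl (fun d v => d.modify v 0 (· + 1)) d) PySem.Dict.empty
  if counts.items = [] then 0
  else
    match PySem.List.max? counts.values (fun x => x) with
    | none => 0   -- unreachable: counts is nonempty here, so max? is some (Python max does not raise)
    | some maxCount =>
      PySem.List.minD ((counts.items.filter (fun p => p.2 == maxCount)).map (fun p => p.1)) (fun x => x) 0

-- ===== PORT B =====
-- the run-scan loop of Source B: state (best_c, best_n, run_c, run_n), one step per remaining value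
def pvScanRuns (bc bn rc rn : Int) : List Int → Int
  | [] => bc
  | v :: rest =>
    let rc' := if v = rc then rc else v
    let rn' := if v = rc then rn + 1 else 1
    if rn' > bn then pvScanRuns rc' rn' rc' rn' rest
    else pvScanRuns bc bn rc' rn' rest

def mode_colour_py_alt (grid : List (List Int)) : Int :=
  let vals := grid.flatten   -- the collection loop: every row is a Sequence of ints, so all cells are kept
  if vals = [] then 0
  else
    match PySem.List.sorted vals (fun x => x) with
    | [] => 0   -- unreachable: vals ≠ []
    | v0 :: tl => pvScanRuns v0 1 v0 1 tl   -- best/run start at (vals[0], 1); loop over vals[1:]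

-- ===== PRECONDITION & SPEC =====
def Spec_mode_colour_py (grid : List (List Int)) (out : Int) : Prop := out = mode_colour_py_alt grid
instance (grid : List (List Int)) (out : Int) : Decidable (Spec_mode_colour_py grid out) := by unfold Spec_mode_colour_py; infer_instance

-- ===== CLAIM (what is proved, stated in full; the proofs are below) =====
def Claim_equal_mode_colour_py : Prop := ∀ (grid : List (List Int)), Dom_mode_colour_py grid → Spec_mode_colour_py grid (mode_colour_py grid)

-- ===== LEMMAS AND PROOFS =====

-- the common characterisation: c is the least colour of maximal multiplicity in xs
def IsLeastMode (xs : List Int) (c : Int) : Prop :=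
  c ∈ xs ∧ (∀ d ∈ xs, xs.count d ≤ xs.count c) ∧ (∀ d ∈ xs, xs.count d = xs.count c → c ≤ d)

theorem isLeastMode_unique {xs : List Int} {c₁ c₂ : Int}
    (h₁ : IsLeastMode xs c₁) (h₂ : IsLeastMode xs c₂) : c₁ = c₂ := by
  obtain ⟨m1, mx1, lo1⟩ := h₁
  obtain ⟨m2, mx2, lo2⟩ := h₂
  have e1 := mx1 c₂ m2
  have e2 := mx2 c₁ m1
  have : xs.count c₁ = xs.count c₂ := by omega
  have a1 := lo1 c₂ m2 this.symm
  have a2 := lo2 c₁ m1 this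
  omega

theorem isLeastMode_perm {xs ys : List Int} {c : Int} (hp : xs.Perm ys)
    (h : IsLeastMode xs c) : IsLeastMode ys c := by
  obtain ⟨m, mx, lo⟩ := h
  refine ⟨hp.mem_iff.mp m, ?_, ?_⟩
  · intro d hd
    rw [← hp.count_eq, ← hp.count_eq]
    exact mx d (hp.mem_iff.mpr hd)
  · intro d hd he
    rw [← hp.count_eq, ← hp.count_eq] at he
    exact lo d (hp.mem_iff.mpr hd) he

theorem mode_colour_py_eq_zero_of_nil {grid : List (List Int)}
    (h : grid.flatten = []) : mode_colour_py grid = 0 := by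
  unfold mode_colour_py
  rw [← List.foldl_flatten, h]
  simp [PySem.Dict.empty]

theorem pvScanRuns_spec :
    ∀ (rest p : List Int) (bc rc : Int),
      (p ++ rest).Pairwise (· ≤ ·) →
      rc ∈ p → (∀ x ∈ p, x ≤ rc) →
      bc ∈ p →
      (∀ x ∈ p, p.count x ≤ p.count bc) →
      (∀ x ∈ p, p.count x = p.count bc → bc ≤ x) →
      IsLeastMode (p ++ rest) (pvScanRuns bc (p.count bc) rc (p.count rc) rest) := by
  intro rest
  induction rest with
  | nil =>
    intro p bc rc _ _ _ hbc hmax hlo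
    simpa [pvScanRuns, IsLeastMode] using ⟨hbc, hmax, hlo⟩
  | cons v t ih =>
    intro p bc rc hpw hrc hrcmax hbc hmax hlo
    have hv : ∀ x ∈ p, x ≤ v := by
      intro x hx
      have := (List.pairwise_append.mp hpw).2.2 x hx v (by simp)
      exact this
    have hpw' : ((p ++ [v]) ++ t).Pairwise (· ≤ ·) := by
      rw [List.append_assoc]; exact hpw
    have happ : p ++ v :: t = (p ++ [v]) ++ t := by simp
    rw [happ]
    by_cases hveq : v = rc
    · -- same run
      subst hveq
      have hc : (p ++ [v]).count v = p.count v + 1 := by simp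
      by_cases hgt : ((p.count v : Int) + 1 > (p.count bc : Int))
      · have step : pvScanRuns bc (p.count bc) v (p.count v) (v :: t)
            = pvScanRuns v ((p ++ [v]).count v) v ((p ++ [v]).count v) t := by
          simp [pvScanRuns, hgt, hc]
        rw [step]
        apply ih
        · exact hpw'
        · simp
        · intro x hx
          rcases List.mem_append.mp hx with hx | hx
          · exact hrcmax x hx
          · simp at hx; omega
        · simp
        · intro x hx
          by_cases hxv : x = v
          · subst hxv; exact le_refl _
          · have hxp : x ∈ p := by
              rcases List.mem_append.mp hx with h | h
              · exact h
              · simp at h; exact absurd h hxv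
            have : (p ++ [v]).count x = p.count x := by
              simp [List.count_append, Ne.symm hxv]
            rw [this, hc]
            have := hmax x hxp
            omega
        · intro x hx hcx
          by_cases hxv : x = v
          · subst hxv; exact le_refl _
          · have hxp : x ∈ p := by
              rcases List.mem_append.mp hx with h | h
              · exact h
              · simp at h; exact absurd h hxv
            have : (p ++ [v]).count x = p.count x := by
              simp [List.count_append, Ne.symm hxv]
            rw [this, hc] at hcx
            have := hmax x hxp
            omega
      · -- no update
        have hbcne : bc ≠ v := by
          intro he; subst he
          omega
        have hcbc : (p ++ [v]).count bc = p.count bc := by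
          simp [List.count_append, Ne.symm hbcne]
        have step : pvScanRuns bc (p.count bc) v (p.count v) (v :: t)
            = pvScanRuns bc ((p ++ [v]).count bc) v ((p ++ [v]).count v) t := by
          simp [pvScanRuns, hgt, hc, hcbc]
        rw [step]
        apply ih
        · exact hpw'
        · simp
        · intro x hx
          rcases List.mem_append.mp hx with hx | hx
          · exact hrcmax x hx
          · simp at hx; omega
        · exact List.mem_append.mpr (Or.inl hbc)
        · intro x hx
          by_cases hxv : x = v
          · subst hxv; rw [hc, hcbc]; omega
          · have hxp : x ∈ p := by
              rcases List.mem_append.mp hx with h | h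
              · exact h
              · simp at h; exact absurd h hxv
            have : (p ++ [v]).count x = p.count x := by
              simp [List.count_append, Ne.symm hxv]
            rw [this, hcbc]
            exact hmax x hxp
        · intro x hx hcx
          by_cases hxv : x = v
          · subst hxv
            exact hrcmax bc hbc
          · have hxp : x ∈ p := by
              rcases List.mem_append.mp hx with h | h
              · exact h
              · simp at h; exact absurd h hxv
            have : (p ++ [v]).count x = p.count x := by
              simp [List.count_append, Ne.symm hxv]
            rw [this, hcbc] at hcx
            exact hlo x hxp hcx
    · -- new run
      have hvnp : v ∉ p := by
        intro hvp
        exact hveq (le_antisymm (hrcmax v hvp) (hv rc hrc))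
      have hcv : (p ++ [v]).count v = 1 := by
        simp [List.count_append, List.count_eq_zero_of_not_mem hvnp]
      have hbcne : bc ≠ v := fun he => hvnp (he ▸ hbc)
      have hcbc : (p ++ [v]).count bc = p.count bc := by
        simp [List.count_append, Ne.symm hbcne]
      have hbcpos : 0 < p.count bc := List.count_pos_iff.mpr hbc
      have hngt : ¬ ((1 : Int) > (p.count bc : Int)) := by omega
      have step : pvScanRuns bc (p.count bc) rc (p.count rc) (v :: t)
          = pvScanRuns bc ((p ++ [v]).count bc) v ((p ++ [v]).count v) t := by
        simp [pvScanRuns, hveq, hngt, hcv, hcbc]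
      rw [step]
      apply ih
      · exact hpw'
      · simp
      · intro x hx
        rcases List.mem_append.mp hx with hx | hx
        · exact hv x hx
        · simp at hx; omega
      · exact List.mem_append.mpr (Or.inl hbc)
      · intro x hx
        by_cases hxv : x = v
        · subst hxv; rw [hcv, hcbc]; omega
        · have hxp : x ∈ p := by
            rcases List.mem_append.mp hx with h | h
            · exact h
            · simp at h; exact absurd h hxv
          have : (p ++ [v]).count x = p.count x := by
            simp [List.count_append, Ne.symm hxv]
          rw [this, hcbc]
          exact hmax x hxp
      · intro x hx hcx
        by_cases hxv : x = v
        · subst hxv; exact hv bc hbc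
        · have hxp : x ∈ p := by
            rcases List.mem_append.mp hx with h | h
            · exact h
            · simp at h; exact absurd h hxv
          have : (p ++ [v]).count x = p.count x := by
            simp [List.count_append, Ne.symm hxv]
          rw [this, hcbc] at hcx
          exact hlo x hxp hcx

theorem mode_colour_py_alt_isLeastMode {grid : List (List Int)}
    (h : grid.flatten ≠ []) : IsLeastMode grid.flatten (mode_colour_py_alt grid) := by
  have hsne : PySem.List.sorted grid.flatten (fun x => x) ≠ [] := by
    rw [Ne, PySem.List.sorted_eq_nil_iff]; exact h
  rcases hs : PySem.List.sorted grid.flatten (fun x => x) with _ | ⟨v0, tl⟩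
  · exact absurd hs hsne
  have hperm : (v0 :: tl).Perm grid.flatten := by
    rw [← hs]; exact PySem.List.sorted_perm grid.flatten (fun x => x) false
  have hpw : (v0 :: tl).Pairwise (· ≤ ·) := by
    have := PySem.List.sorted_pairwise grid.flatten (fun x => x)
    rw [hs] at this; simpa using this
  have hval : mode_colour_py_alt grid = pvScanRuns v0 1 v0 1 tl := by
    simp only [mode_colour_py_alt, if_neg h, hs]
  rw [hval]
  apply isLeastMode_perm hperm
  have hspec := pvScanRuns_spec tl [v0] v0 v0 (by simpa using hpw)
    (by simp) (by simp) (by simp)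
    (by intro x hx; simp at hx; subst hx; exact le_refl _)
    (by intro x hx _; simp at hx; omega)
  simpa using hspec

theorem mode_colour_py_isLeastMode {grid : List (List Int)}
    (h : grid.flatten ≠ []) : IsLeastMode grid.flatten (mode_colour_py grid) := by
  have hfold : grid.foldl (fun d row => row.foldl (fun d v => d.modify v 0 (· + 1)) d) PySem.Dict.empty
      = PySem.Dict.counter grid.flatten := by
    rw [PySem.Dict.counter_eq_foldl]
    exact List.foldl_flatten.symm
  obtain ⟨x0, hx0⟩ := List.exists_mem_of_ne_nil _ h
  have hx0S : x0 ∈ PySem.Set.ofList grid.flatten := (PySem.Set.mem_ofList _ _).mpr hx0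
  have hitems : (PySem.Dict.counter grid.flatten).items
      = (PySem.Set.ofList grid.flatten).map (fun k => (k, (grid.flatten.count k : Int))) :=
    PySem.Dict.items_counter grid.flatten
  have hitemsne : (PySem.Dict.counter grid.flatten).items ≠ [] := by
    rw [hitems]
    exact List.ne_nil_of_mem (List.mem_map_of_mem hx0S)
  have hvalues : (PySem.Dict.counter grid.flatten).values
      = (PySem.Set.ofList grid.flatten).map (fun k => (grid.flatten.count k : Int)) := by
    show (PySem.Dict.counter grid.flatten).items.map (·.2) = _
    rw [hitems, List.map_map]
    rfl
  have hvne : (PySem.Dict.counter grid.flatten).values ≠ [] := by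
    rw [hvalues]
    exact List.ne_nil_of_mem (List.mem_map_of_mem hx0S)
  obtain ⟨M, hM⟩ : ∃ M, PySem.List.max? (PySem.Dict.counter grid.flatten).values (fun x => x) = some M := by
    rcases he : PySem.List.max? (PySem.Dict.counter grid.flatten).values (fun x => x) with _ | M
    · exact absurd ((PySem.List.max?_eq_none_iff _ _).mp he) hvne
    · exact ⟨M, rfl⟩
  have hMmem := PySem.List.max?_mem hM
  have hMmax := PySem.List.max?_isMax hM
  obtain ⟨c0, hc0S, hc0⟩ : ∃ c0 ∈ PySem.Set.ofList grid.flatten, (grid.flatten.count c0 : Int) = M := by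
    rw [hvalues] at hMmem
    obtain ⟨c0, hc0S, hc0⟩ := List.mem_map.mp hMmem
    exact ⟨c0, hc0S, hc0⟩
  have hfilter : ((PySem.Dict.counter grid.flatten).items.filter (fun p => p.2 == M)).map (fun p => p.1)
      = (PySem.Set.ofList grid.flatten).filter (fun k => (grid.flatten.count k : Int) == M) := by
    rw [hitems, List.filter_map, List.map_map]
    simp only [Function.comp_def]
    exact List.map_id _
  have hc0L : c0 ∈ (PySem.Set.ofList grid.flatten).filter (fun k => (grid.flatten.count k : Int) == M) := by
    rw [List.mem_filter]
    exact ⟨hc0S, by simp [hc0]⟩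
  have hLne : (PySem.Set.ofList grid.flatten).filter (fun k => (grid.flatten.count k : Int) == M) ≠ [] :=
    List.ne_nil_of_mem hc0L
  have hval : mode_colour_py grid
      = PySem.List.minD ((PySem.Set.ofList grid.flatten).filter (fun k => (grid.flatten.count k : Int) == M))
          (fun x => x) 0 := by
    simp only [mode_colour_py, hfold, if_neg hitemsne, hM, hfilter]
  set L := (PySem.Set.ofList grid.flatten).filter (fun k => (grid.flatten.count k : Int) == M) with hL
  have hcL : PySem.List.minD L (fun x => x) 0 ∈ L := PySem.List.minD_mem L _ 0 hLne
  obtain ⟨hcS, hcM⟩ := List.mem_filter.mp hcL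
  have hcM' : (grid.flatten.count (PySem.List.minD L (fun x => x) 0) : Int) = M := by
    simpa using hcM
  rw [hval]
  refine ⟨(PySem.Set.mem_ofList _ _).mp hcS, ?_, ?_⟩
  · intro d hd
    have hdv : (grid.flatten.count d : Int) ∈ (PySem.Dict.counter grid.flatten).values := by
      rw [hvalues]
      exact List.mem_map_of_mem ((PySem.Set.mem_ofList _ _).mpr hd)
    have := hMmax _ hdv
    omega
  · intro d hd hde
    have hdL : d ∈ L := by
      rw [hL, List.mem_filter]
      refine ⟨(PySem.Set.mem_ofList _ _).mpr hd, ?_⟩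
      simp [hde, hcM']
    exact PySem.List.minD_id_le L 0 d hdL

-- ===== VERDICT (by name: the statement is the Claim_ definition above) =====
theorem mode_colour_py_spec : Claim_equal_mode_colour_py := by
  intro grid _
  unfold Spec_mode_colour_py
  by_cases h : grid.flatten = []
  · rw [mode_colour_py_eq_zero_of_nil h]
    unfold mode_colour_py_alt
    simp [h]
  · exact isLeastMode_unique (mode_colour_py_isLeastMode h) (mode_colour_py_alt_isLeastMode h)
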